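-- pv_equiv track=rewrite | github.com/danraid/Projetos-SEDUC | Notebooks and Test Datas/test isolation/versões anteriores/quadro_horários_ver_2_1_de_28_02_25.py | professor_tem_gap
-- ===== SOURCE A (Python) =====
-- def professor_tem_gap(horario, prof, turno, nivel, dia):
--     """
--     Verifica se o professor ficou com "furo" entre tempos de aula nesse dia.
--     Exemplo: Ele dá aula no tempo 1 e 3, mas não no 2 => gap.
--     REGRAS: "evitar ao máximo"
--     => iremos punir com uma heurística, mas não necessariamente proibir.
--     """
--     # Descobrir em quais tempos o professor dá aula nesse dia:
--     tempos_prof = []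
--     for (st, aloc_dic) in horario[turno][nivel][dia].items():
--         for tm, (p, dsc) in aloc_dic.items():
--             if p == prof:
--                 tempos_prof.append(tm)
--     if len(tempos_prof) <= 1:
--         return False
--     tempos_prof.sort()
--     # se há "furo" interno
--     for i in range(len(tempos_prof)-1):
--         if tempos_prof[i+1] - tempos_prof[i] > 1:
--             return True
--     return False
-- ===== SOURCE B (Python) =====
-- def professor_tem_gap(horario, prof, turno, nivel, dia):
--     """Contiguity test instead of sort-and-scan: the professor's periods are
--     gap-free iff max - min + 1 == number of distinct periods."""
--     dia_aloc = horario[turno][nivel][dia]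
--     tempos = {tm for aloc in dia_aloc.values()
--                  for tm, (p, _dsc) in aloc.items() if p == prof}
--     return bool(tempos) and max(tempos) - min(tempos) + 1 > len(tempos)
-- ===== Notes on version B (the rewrite author's own statement) =====
-- stated objective: simpler
-- what changed: Replaces the sort-then-adjacent-difference scan over an appended list with a set comprehension over the flattened day and the closed-form contiguity test max-min+1 > number of distinct periods.
import Mathlib
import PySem

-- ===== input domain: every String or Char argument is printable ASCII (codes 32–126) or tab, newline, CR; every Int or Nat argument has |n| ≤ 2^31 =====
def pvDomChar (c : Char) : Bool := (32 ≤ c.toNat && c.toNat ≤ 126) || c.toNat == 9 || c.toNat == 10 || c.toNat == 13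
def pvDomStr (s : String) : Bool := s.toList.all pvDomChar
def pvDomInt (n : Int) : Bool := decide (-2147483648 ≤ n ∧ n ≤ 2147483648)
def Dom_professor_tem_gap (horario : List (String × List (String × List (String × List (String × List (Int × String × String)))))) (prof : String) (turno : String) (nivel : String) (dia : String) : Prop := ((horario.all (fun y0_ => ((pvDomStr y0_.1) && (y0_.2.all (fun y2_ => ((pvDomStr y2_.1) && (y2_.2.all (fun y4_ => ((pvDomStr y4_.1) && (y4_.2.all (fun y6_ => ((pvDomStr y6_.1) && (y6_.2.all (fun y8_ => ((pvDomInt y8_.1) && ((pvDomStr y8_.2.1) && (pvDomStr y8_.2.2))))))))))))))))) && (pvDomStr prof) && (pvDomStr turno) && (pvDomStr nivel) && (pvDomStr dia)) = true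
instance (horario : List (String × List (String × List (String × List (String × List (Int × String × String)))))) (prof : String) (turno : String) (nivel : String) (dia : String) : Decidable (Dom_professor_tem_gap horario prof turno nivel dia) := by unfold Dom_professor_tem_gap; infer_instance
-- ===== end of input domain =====

-- B replaces A's append-collect + sort + adjacent-difference scan by a flatten/filter
-- set comprehension and the closed-form contiguity test max - min + 1 > #distinct (simpler).


-- ===== PORT A =====
def professor_tem_gap (horario : List (String × List (String × List (String × List (String × List (Int × String × String)))))) (prof : String) (turno : String) (nivel : String) (dia : String) : Bool :=
  match horario.lookup turno with
  | none => false    -- KeyError in Python; excluded by Pre_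
  | some h1 =>
    match h1.lookup nivel with
    | none => false  -- KeyError
    | some h2 =>
      match h2.lookup dia with
      | none => false  -- KeyError
      | some ddia =>
        -- tempos_prof = []; nested for-loops appending tm when p == prof
        let tempos := ddia.foldl (fun acc st_aloc =>
          st_aloc.2.foldl (fun acc2 it =>
            if it.2.1 = prof then acc2 ++ [it.1] else acc2) acc) []
        if tempos.length ≤ 1 then false
        else
          let s := PySem.List.sorted tempos (fun x => x)
          -- for i in range(len(tempos)-1): if tempos[i+1]-tempos[i] > 1: return True
          (PySem.List.pyRange 0 ((s.length : Int) - 1) 1).any (fun i =>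
            decide (PySem.List.pyGetD s (i + 1) 0 - PySem.List.pyGetD s i 0 > 1))

-- ===== PORT B =====
def professor_tem_gap_alt (horario : List (String × List (String × List (String × List (String × List (Int × String × String)))))) (prof : String) (turno : String) (nivel : String) (dia : String) : Bool :=
  -- dia_aloc = horario[turno][nivel][dia] (chained indexing; none = KeyError, excluded by Pre_)
  match (horario.lookup turno).bind (fun h1 => (h1.lookup nivel).bind (fun h2 => h2.lookup dia)) with
  | none => false
  | some dia_aloc =>
    -- set comprehension over the flattened day's allocations
    let tempos : PySem.Set Int :=
      PySem.Set.ofList ((dia_aloc.flatMap (fun aloc => aloc.2)).filterMap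
        (fun it => if it.2.1 = prof then some it.1 else none))
    -- bool(tempos) and max - min + 1 > len(tempos)
    if tempos = [] then false
    else
      match PySem.List.max? tempos (fun x => x), PySem.List.min? tempos (fun x => x) with
      | some mx, some mn => decide (mx - mn + 1 > (tempos.length : Int))
      | _, _ => false  -- unreachable: tempos ≠ []

-- ===== PRECONDITION & SPEC =====
-- Pre_ excludes exactly the inputs where Python A raises KeyError: turno, nivel or dia missing.
def Pre_professor_tem_gap (horario : List (String × List (String × List (String × List (String × List (Int × String × String)))))) (prof : String) (turno : String) (nivel : String) (dia : String) : Prop :=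
  ∃ h1, horario.lookup turno = some h1 ∧ ∃ h2, h1.lookup nivel = some h2 ∧ (h2.lookup dia).isSome
instance (horario : List (String × List (String × List (String × List (String × List (Int × String × String)))))) (prof : String) (turno : String) (nivel : String) (dia : String) : Decidable (Pre_professor_tem_gap horario prof turno nivel dia) := by unfold Pre_professor_tem_gap; infer_instance

def pvWitness_professor_tem_gap : (List (String × List (String × List (String × List (String × List (Int × String × String)))))) × String × String × String × String :=
  ([("m", [("f", [("seg", [("t1", [(1, "ana", "mat"), (3, "ana", "fis")])])])])], "ana", "m", "f", "seg")

def Spec_professor_tem_gap (horario : List (String × List (String × List (String × List (String × List (Int × String × String)))))) (prof : String) (turno : String) (nivel : String) (dia : String) (out : Bool) : Prop := out = professor_tem_gap_alt horario prof turno nivel dia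
instance (horario : List (String × List (String × List (String × List (String × List (Int × String × String)))))) (prof : String) (turno : String) (nivel : String) (dia : String) (out : Bool) : Decidable (Spec_professor_tem_gap horario prof turno nivel dia out) := by unfold Spec_professor_tem_gap; infer_instance

-- ===== CLAIM (what is proved, stated in full; the proofs are below) =====
def Claim_equal_professor_tem_gap : Prop := ∀ (horario : List (String × List (String × List (String × List (String × List (Int × String × String)))))) (prof : String) (turno : String) (nivel : String) (dia : String), Dom_professor_tem_gap horario prof turno nivel dia → Pre_professor_tem_gap horario prof turno nivel dia → Spec_professor_tem_gap horario prof turno nivel dia (professor_tem_gap horario prof turno nivel dia)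

-- ===== LEMMAS AND PROOFS =====

-- A's inner append-collection equals acc ++ a filterMap
theorem inner_filterMap (prof : String) (l : List (Int × String × String)) (acc : List Int) :
    l.foldl (fun acc2 it => if it.2.1 = prof then acc2 ++ [it.1] else acc2) acc
      = acc ++ l.filterMap (fun it => if it.2.1 = prof then some it.1 else none) := by
  induction l generalizing acc with
  | nil => simp
  | cons hd t ih =>
    simp only [List.foldl_cons, List.filterMap_cons]
    by_cases h : hd.2.1 = prof
    · simp [h, ih, List.append_assoc]
    · simp [h, ih]

-- A's nested collection equals acc ++ the flatten/filterMap pipeline of B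
theorem outer_filterMap (prof : String) (l : List (String × List (Int × String × String)))
    (acc : List Int) :
    l.foldl (fun acc st_aloc => st_aloc.2.foldl (fun acc2 it => if it.2.1 = prof then acc2 ++ [it.1] else acc2) acc) acc
      = acc ++ (l.flatMap (fun aloc => aloc.2)).filterMap (fun it => if it.2.1 = prof then some it.1 else none) := by
  induction l generalizing acc with
  | nil => simp
  | cons hd t ih =>
    simp only [List.foldl_cons, List.flatMap_cons, List.filterMap_append]
    rw [inner_filterMap, ih, List.append_assoc]

-- A's scan on the sorted list, as a proposition over indices
theorem scan_iff (s : List Int) (hs : 1 ≤ s.length) :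
    ((PySem.List.pyRange 0 ((s.length : Int) - 1) 1).any (fun i =>
        decide (PySem.List.pyGetD s (i + 1) 0 - PySem.List.pyGetD s i 0 > 1)) = true)
      ↔ ∃ j, ∃ h : j + 1 < s.length, s[j + 1] - s[j] > 1 := by
  have hcast : ((s.length : Int) - 1) = ((s.length - 1 : Nat) : Int) := by omega
  rw [hcast, PySem.List.pyRange_zero_natCast]
  simp only [List.any_map, List.any_eq_true, List.mem_range, Function.comp]
  constructor
  · rintro ⟨j, hj, hd⟩
    have hj1 : j + 1 < s.length := by omega
    refine ⟨j, hj1, ?_⟩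
    rw [show ((j : Int) + 1) = ((j + 1 : Nat) : Int) by push_cast; ring] at hd
    rw [PySem.List.pyGetD_natCast, PySem.List.pyGetD_natCast] at hd
    simpa [List.getD_eq_getElem?_getD, List.getElem?_eq_getElem hj1,
      List.getElem?_eq_getElem (by omega : j < s.length)] using hd
  · rintro ⟨j, hj1, hd⟩
    refine ⟨j, by omega, ?_⟩
    rw [show ((j : Int) + 1) = ((j + 1 : Nat) : Int) by push_cast; ring]
    rw [PySem.List.pyGetD_natCast, PySem.List.pyGetD_natCast]
    simpa [List.getD_eq_getElem?_getD, List.getElem?_eq_getElem hj1,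
      List.getElem?_eq_getElem (by omega : j < s.length)] using hd

-- a chain with steps ≤ 1 hits every integer between its head and any member bound
theorem chain_covers (a : Int) (l : List Int)
    (hch : List.IsChain (fun x y => y ≤ x + 1) (a :: l)) :
    ∀ k, a ≤ k → (∃ m ∈ a :: l, k ≤ m) → k ∈ a :: l := by
  induction l generalizing a with
  | nil =>
    rintro k hak ⟨m, hm, hkm⟩
    simp only [List.mem_singleton] at hm; subst hm
    simp; omega
  | cons b t ih =>
    rintro k hak ⟨m, hm, hkm⟩
    rcases eq_or_lt_of_le hak with h | h
    · exact h ▸ List.mem_cons_self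
    · obtain ⟨hhd, hch'⟩ := List.isChain_cons.mp hch
      have hba : b ≤ a + 1 := hhd b rfl
      have hbk : b ≤ k := by omega
      rw [List.mem_cons] at hm
      rcases hm with hm | hm
      · exact absurd (le_trans hkm (le_of_eq hm)) (not_le.mpr h)
      · exact List.mem_cons_of_mem _ (ih b hch' k hbk ⟨m, hm, hkm⟩)

-- distinct integers in [mn, mx] avoiding the hole g are at most mx - mn many
theorem card_le_of_subset_Icc_erase (s : List Int) (mn mx g : Int) (hnd : s.Nodup)
    (hg : mn ≤ g ∧ g ≤ mx) (hgs : g ∉ s)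
    (hsub : ∀ x ∈ s, mn ≤ x ∧ x ≤ mx) : (s.length : Int) ≤ mx - mn := by
  have h1 : s.toFinset ⊆ (Finset.Icc mn mx).erase g := by
    intro x hx
    rw [List.mem_toFinset] at hx
    exact Finset.mem_erase.mpr ⟨fun he => hgs (he ▸ hx), Finset.mem_Icc.mpr (hsub x hx)⟩
  have h2 : s.toFinset.card ≤ ((Finset.Icc mn mx).erase g).card := Finset.card_le_card h1
  rw [List.toFinset_card_of_nodup hnd,
    Finset.card_erase_of_mem (Finset.mem_Icc.mpr hg), Int.card_Icc] at h2
  have h3 : (mx + 1 - mn).toNat = (mx - mn).toNat + 1 := by omega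
  omega

-- the core equivalence on the collected period list
theorem core_lemma (ts : List Int) :
    (if ts.length ≤ 1 then false
     else (PySem.List.pyRange 0 (((PySem.List.sorted ts (fun x => x)).length : Int) - 1) 1).any (fun i =>
        decide (PySem.List.pyGetD (PySem.List.sorted ts (fun x => x)) (i + 1) 0
              - PySem.List.pyGetD (PySem.List.sorted ts (fun x => x)) i 0 > 1)))
    = (if (PySem.Set.ofList ts : List Int) = [] then false
       else match PySem.List.max? (PySem.Set.ofList ts) (fun x => x),
                  PySem.List.min? (PySem.Set.ofList ts) (fun x => x) with
            | some mx, some mn => decide (mx - mn + 1 > ((PySem.Set.ofList ts : List Int).length : Int))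
            | _, _ => false) := by
  by_cases hts : ts = []
  · subst hts; rfl
  set S : List Int := PySem.Set.ofList ts with hS
  have hmemS : ∀ x, x ∈ S ↔ x ∈ ts := by
    intro x; rw [hS, ← PySem.List.dedup_eq_ofList]; exact PySem.List.mem_dedup ts x
  have hndS : S.Nodup := by rw [hS, ← PySem.List.dedup_eq_ofList]; exact PySem.List.nodup_dedup ts
  obtain ⟨a0, ha0⟩ := List.exists_mem_of_ne_nil ts hts
  have hSne : S ≠ [] := List.ne_nil_of_mem ((hmemS a0).mpr ha0)
  obtain ⟨mx, hmx⟩ : ∃ mx, PySem.List.max? S (fun x => x) = some mx := by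
    rcases h : PySem.List.max? S (fun x => x) with _ | v
    · exact absurd ((PySem.List.max?_eq_none_iff S _).mp h) hSne
    · exact ⟨v, rfl⟩
  obtain ⟨mn, hmn⟩ : ∃ mn, PySem.List.min? S (fun x => x) = some mn := by
    rcases h : PySem.List.min? S (fun x => x) with _ | v
    · exact absurd ((PySem.List.min?_eq_none_iff S _).mp h) hSne
    · exact ⟨v, rfl⟩
  have hmxmem : mx ∈ ts := (hmemS mx).mp (PySem.List.max?_mem hmx)
  have hmnmem : mn ∈ ts := (hmemS mn).mp (PySem.List.min?_mem hmn)
  have hmxmax : ∀ y ∈ ts, y ≤ mx := fun y hy => PySem.List.max?_isMax hmx y ((hmemS y).mpr hy)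
  have hmnmin : ∀ y ∈ ts, mn ≤ y := fun y hy => PySem.List.min?_isMin hmn y ((hmemS y).mpr hy)
  rw [if_neg hSne, hmx, hmn]
  set l : List Int := PySem.List.sorted ts (fun x => x) with hl
  have hlperm : l.Perm ts := PySem.List.sorted_perm ts (fun x => x) false
  have hmono : ∀ (p q : Nat) (hpq : p ≤ q) (hq : q < l.length), l[p]'(Nat.lt_of_le_of_lt hpq hq) ≤ l[q] :=
    fun p q hpq hq => PySem.List.sorted_id_getElem_mono ts hpq hq
  have hlmem : ∀ x, x ∈ l ↔ x ∈ ts := fun x => hlperm.mem_iff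
  have hllen : l.length = ts.length := hlperm.length_eq
  by_cases hlen : ts.length ≤ 1
  · -- single element: max = min and the set is a singleton; both sides false
    rw [if_pos hlen]
    have hlen1 : ts.length = 1 := by
      have h0 := List.length_pos_of_ne_nil (α := Int) (l := ts) hts
      omega
    obtain ⟨x, hx⟩ := List.length_eq_one_iff.mp hlen1
    rw [hx] at hmxmem hmnmem
    simp only [List.mem_singleton] at hmxmem hmnmem
    have hS1 : 1 ≤ (S.length : Int) := by
      exact_mod_cast List.length_pos_of_ne_nil hSne
    have hfalse : ¬ (mx - mn + 1 > (S.length : Int)) := by omega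
    simp [hfalse]
  · rw [if_neg hlen]
    push Not at hlen
    rw [Bool.eq_iff_iff, scan_iff l (by omega), decide_eq_true_iff]
    constructor
    · -- gap ⇒ count short: g := l[j]+1 is a hole in [mn, mx]
      rintro ⟨j, hj1, hgap⟩
      have hjlt : j < l.length := by omega
      set g : Int := l[j] + 1 with hg
      have hgnot : g ∉ ts := by
        intro hgts
        obtain ⟨i, hi, hieq⟩ := List.mem_iff_getElem.mp ((hlmem g).mpr hgts)
        by_cases hij : i ≤ j
        · have := hmono i j hij hjlt
          omega
        · have := hmono (j + 1) i (by omega) hi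
          omega
      have hmnj : mn ≤ l[j] := hmnmin _ ((hlmem _).mp (l.getElem_mem hjlt))
      have hjmx : l[j + 1] ≤ mx := hmxmax _ ((hlmem _).mp (l.getElem_mem hj1))
      have hcard := card_le_of_subset_Icc_erase S mn mx g hndS
        ⟨by omega, by omega⟩ (fun h => hgnot ((hmemS g).mp h))
        (fun x hx => ⟨hmnmin x ((hmemS x).mp hx), hmxmax x ((hmemS x).mp hx)⟩)
      omega
    · -- count short ⇒ gap (contrapositive: no gap means [mn, mx] is covered)
      intro hcount
      by_contra hnogap
      push Not at hnogap
      have hch : List.IsChain (fun x y => y ≤ x + 1) l := by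
        rw [List.isChain_iff_getElem]
        intro i hi
        have := hnogap i (by omega)
        omega
      obtain ⟨a, t, hat⟩ := List.exists_cons_of_ne_nil (by
        intro h; rw [h] at hllen; simp at hllen; omega : l ≠ [])
      have hcov : ∀ k, mn ≤ k → k ≤ mx → k ∈ l := by
        intro k hk1 hk2
        have ha_mn : a ≤ mn := by
          simpa using PySem.List.key_head_sorted_le ts (fun x => x) hat mn hmnmem
        have : k ∈ a :: t := by
          apply chain_covers a t (hat ▸ hch) k (by omega)
          exact ⟨mx, hat ▸ (hlmem mx).mpr hmxmem, hk2⟩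
        exact hat ▸ this
      have h1 : Finset.Icc mn mx ⊆ S.toFinset := by
        intro x hx
        rw [Finset.mem_Icc] at hx
        rw [List.mem_toFinset, hmemS, ← hlmem]
        exact hcov x hx.1 hx.2
      have h2 := Finset.card_le_card h1
      rw [List.toFinset_card_of_nodup hndS, Int.card_Icc] at h2
      omega

-- ===== VERDICT (by name: the statement is the Claim_ definition above) =====
theorem professor_tem_gap_spec : Claim_equal_professor_tem_gap := by
  intro horario prof turno nivel dia _ hpre
  obtain ⟨h1, e1, h2, e2, hd⟩ := hpre
  obtain ⟨ddia, e3⟩ := Option.isSome_iff_exists.mp hd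
  unfold Spec_professor_tem_gap professor_tem_gap professor_tem_gap_alt
  simp only [e1, e2, e3, Option.bind_some]
  rw [outer_filterMap prof ddia []]
  exact core_lemma _
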